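-- pv_equiv track=rewrite | github.com/ajeldorado/falco-python | falco/segmentutils.py | hexSegMirror_numSegments
-- ===== SOURCE A (Python) =====
-- def hexSegMirror_numSegments( numRings ):
-- #%hexSegMirror_numSegments Returns the number of segments in a hexagonal
-- #%mirror with a given number of rings, 'numRings'
-- #%   numRings - number of rings in the mirror
-- #
-- #% loop through rings and add up the number of segments
--     numOfSegments = 0
--     for ringNum in range(numRings+1): #= 0:numRings
--         numOfSegments = numOfSegments + 1
--         for face in range(1,7): #= 1:6
--
--             stepnum = 1
--
--             while(stepnum<=ringNum):
--                 if(face==6 and stepnum==ringNum):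
--                     #disp(['Finished ring ',num2str(ringNum)]);
--                     pass
--                 else:
--                     numOfSegments = numOfSegments + 1;
--                     pass
--
--                 stepnum = stepnum + 1;
--
--     return numOfSegments
-- ===== SOURCE B (Python) =====
-- def hexSegMirror_numSegments(numRings):
--     # Closed form: ring 0 has 1 segment, ring r (r >= 1) adds 6*r segments,
--     # so the total is 1 + 6*(1 + 2 + ... + numRings) = 1 + 3*numRings*(numRings+1).
--     if numRings < 0:
--         return 0
--     return 1 + 3 * numRings * (numRings + 1)
-- ===== Notes on version B (the rewrite author's own statement) =====
-- stated objective: faster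
-- what changed: Replaced the triple-nested ring/face/step counting loops by the closed-form formula 1 + 3*numRings*(numRings+1) (0 for negative numRings).
import Mathlib
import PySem

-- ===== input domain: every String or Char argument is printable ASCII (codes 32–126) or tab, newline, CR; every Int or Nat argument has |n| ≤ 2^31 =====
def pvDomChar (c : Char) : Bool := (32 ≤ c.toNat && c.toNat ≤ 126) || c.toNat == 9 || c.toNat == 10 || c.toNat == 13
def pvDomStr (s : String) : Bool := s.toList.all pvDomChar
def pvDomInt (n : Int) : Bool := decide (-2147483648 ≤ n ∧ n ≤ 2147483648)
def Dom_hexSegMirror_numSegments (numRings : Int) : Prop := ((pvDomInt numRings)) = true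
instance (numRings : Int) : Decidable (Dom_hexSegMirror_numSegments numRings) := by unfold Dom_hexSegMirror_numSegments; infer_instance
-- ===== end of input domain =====

-- B replaces A's triple-nested counting loops by the closed-form 1 + 3*n*(n+1) (objective: faster).

-- ===== PORT A =====
-- the inner 'while stepnum <= ringNum' loop, transliterated as recursion on the remaining steps
def hexWhile (face ringNum stepnum acc : Int) : Int :=
  if h : stepnum ≤ ringNum then
    hexWhile face ringNum (stepnum + 1)
      (if face = 6 ∧ stepnum = ringNum then acc else acc + 1)
  else acc
termination_by (ringNum + 1 - stepnum).toNat
decreasing_by omega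

def hexSegMirror_numSegments (numRings : Int) : Int :=
  (PySem.List.pyRange 0 (numRings + 1) 1).foldl
    (fun numOfSegments ringNum =>
      (PySem.List.pyRange 1 7 1).foldl
        (fun acc face => hexWhile face ringNum 1 acc)
        (numOfSegments + 1))
    0

-- ===== PORT B =====
def hexSegMirror_numSegments_alt (numRings : Int) : Int :=
  if numRings < 0 then 0 else 1 + 3 * numRings * (numRings + 1)

-- ===== PRECONDITION & SPEC =====
def Spec_hexSegMirror_numSegments (numRings : Int) (out : Int) : Prop := out = hexSegMirror_numSegments_alt numRings
instance (numRings : Int) (out : Int) : Decidable (Spec_hexSegMirror_numSegments numRings out) := by unfold Spec_hexSegMirror_numSegments; infer_instance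

-- ===== CLAIM (what is proved, stated in full; the proofs are below) =====
def Claim_equal_hexSegMirror_numSegments : Prop := ∀ (numRings : Int), Dom_hexSegMirror_numSegments numRings → Spec_hexSegMirror_numSegments numRings (hexSegMirror_numSegments numRings)

-- ===== LEMMAS AND PROOFS =====

-- the while loop adds (number of steps) minus one if face = 6 reaches ringNum
theorem hexWhile_eq (face ringNum : Int) :
    ∀ stepnum acc : Int,
      hexWhile face ringNum stepnum acc =
        acc + max (ringNum + 1 - stepnum) 0 -
          (if face = 6 ∧ stepnum ≤ ringNum then 1 else 0) := by
  intro stepnum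
  induction hn : (ringNum + 1 - stepnum).toNat generalizing stepnum with
  | zero =>
    intro acc
    rw [hexWhile]
    have : ¬ stepnum ≤ ringNum := by omega
    simp [this]
    omega
  | succ k ih =>
    intro acc
    rw [hexWhile]
    have hle : stepnum ≤ ringNum := by omega
    rw [dif_pos hle]
    rw [ih (stepnum + 1) (by omega)]
    by_cases hf : face = 6
    · by_cases he : stepnum = ringNum <;> simp [hf, he] <;> omega
    · simp [hf]; omega

-- the inner face loop adds 6*ringNum (minus the skipped last step of face 6) plus the 1
theorem hexBody_eq (acc ringNum : Int) (h : 0 ≤ ringNum) :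
    (PySem.List.pyRange 1 7 1).foldl (fun a face => hexWhile face ringNum 1 a) (acc + 1) =
      acc + 1 + 6 * ringNum - (if 1 ≤ ringNum then 1 else 0) := by
  have : PySem.List.pyRange 1 7 1 = [1, 2, 3, 4, 5, 6] := by decide
  rw [this]
  simp only [List.foldl]
  rw [hexWhile_eq, hexWhile_eq, hexWhile_eq, hexWhile_eq, hexWhile_eq, hexWhile_eq]
  by_cases h1 : 1 ≤ ringNum <;> (simp [h1]; omega)

theorem hexA_nat (k : Nat) :
    hexSegMirror_numSegments (k : Int) = 1 + 3 * (k : Int) * ((k : Int) + 1) := by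
  induction k with
  | zero =>
    unfold hexSegMirror_numSegments
    rw [show ((0 : Nat) : Int) + 1 = 0 + 1 by norm_num,
        PySem.List.pyRange_one_singleton]
    simp only [List.foldl]
    rw [show (0 : Int) + 1 = 0 + 1 by norm_num, hexBody_eq 0 0 le_rfl]
    norm_num
  | succ n ih =>
    unfold hexSegMirror_numSegments at *
    have hsplit : PySem.List.pyRange 0 ((((n : Int) + 1) + 1)) 1 =
        PySem.List.pyRange 0 ((n : Int) + 1) 1 ++ [(n : Int) + 1] :=
      PySem.List.pyRange_one_succ_right (by omega)
    push_cast
    rw [hsplit, List.foldl_append]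
    simp only [List.foldl]
    rw [ih, hexBody_eq _ _ (by omega)]
    have : (1 : Int) ≤ (n : Int) + 1 := by omega
    simp [this]
    ring

theorem hexA_neg (n : Int) (h : n < 0) : hexSegMirror_numSegments n = 0 := by
  unfold hexSegMirror_numSegments
  rw [show PySem.List.pyRange 0 (n + 1) 1 = [] from
    PySem.List.pyRange_one_eq_nil (by omega)]
  rfl

-- ===== VERDICT (by name: the statement is the Claim_ definition above) =====
theorem hexSegMirror_numSegments_spec : Claim_equal_hexSegMirror_numSegments := by
  intro n _
  unfold Spec_hexSegMirror_numSegments hexSegMirror_numSegments_alt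
  by_cases h : n < 0
  · rw [hexA_neg n h, if_pos h]
  · obtain ⟨k, rfl⟩ := Int.eq_ofNat_of_zero_le (by omega : 0 ≤ n)
    rw [hexA_nat, if_neg h]
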